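-- pv_equiv track=rewrite | github.com/Bigazzon/AoE_2023 | Challenges/03/2023_03.py | check_left
-- ===== SOURCE A (Python) =====
-- def check_left(lines, i, j):
--     left = lines[i][max(j - 3, 0) : j]
--     if not left[-1].isdigit():
--         return 0
--     else:
--         left_digit = left[-1]
--         for c in left[::-1][1:]:
--             if c.isdigit():
--                 left_digit = c + left_digit
--             else:
--                 break
--     return int(left_digit)
-- ===== SOURCE B (Python) =====
-- def check_left(lines, i, j):
--     window = lines[i][max(j - 3, 0) : j]
--     run = window[len(window.rstrip("0123456789")) :]
--     return int(run) if run else 0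
-- ===== Notes on version B (the rewrite author's own statement) =====
-- stated objective: idiomatic
-- what changed: A's last-char digit guard plus reverse for-loop that accumulates the number by string prepending is replaced by an rstrip("0123456789")-based slice that takes the trailing digit run in one step and a single int() call (no explicit loop).
import Mathlib
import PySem

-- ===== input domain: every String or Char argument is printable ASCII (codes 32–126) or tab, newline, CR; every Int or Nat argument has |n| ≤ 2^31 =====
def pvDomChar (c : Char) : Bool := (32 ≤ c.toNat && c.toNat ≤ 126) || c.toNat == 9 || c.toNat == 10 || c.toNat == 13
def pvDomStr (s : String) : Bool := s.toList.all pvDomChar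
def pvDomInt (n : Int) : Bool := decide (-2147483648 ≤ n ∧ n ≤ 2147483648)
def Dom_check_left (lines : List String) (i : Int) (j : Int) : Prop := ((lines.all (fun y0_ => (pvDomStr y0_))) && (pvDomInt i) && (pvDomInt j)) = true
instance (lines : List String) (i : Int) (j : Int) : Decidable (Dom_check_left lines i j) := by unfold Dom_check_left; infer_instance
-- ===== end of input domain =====

-- B replaces A's last-char guard and reverse accumulation loop with an rstrip-based
-- trailing-digit-run slice and a single int() — idiomatic, no explicit loop.

-- ===== PORT A =====
-- the loop 'for c in left[::-1][1:]: if c.isdigit(): left_digit = c + left_digit else: break'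
def checkLeftLoop : List Char → List Char → List Char
  | [], acc => acc
  | c :: rest, acc =>
    if PySem.Chars.isdigit c then checkLeftLoop rest (c :: acc) else acc

def check_left (lines : List String) (i : Int) (j : Int) : Int :=
  let s := (PySem.List.pyGet? lines i).getD ""                         -- lines[i]; none = IndexError, excluded by Pre_
  let left := PySem.Str.slice s (some (max (j - 3) 0)) (some j)        -- lines[i][max(j-3,0):j]
  match PySem.Str.pyGet? left (-1) with                                -- left[-1]; none = IndexError, excluded by Pre_
  | none => 0
  | some last =>
    if ¬ PySem.Chars.isdigit last then 0
    else
      -- left[::-1] is reverse, [1:] drops one; prepending 'c + left_digit' builds the char list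
      let acc := checkLeftLoop (left.toList.reverse.drop 1) [last]
      (PySem.Int.ofChars? acc).getD 0                                  -- int(left_digit); acc nonempty all-digit, never none

-- ===== PORT B =====
def check_left_alt (lines : List String) (i : Int) (j : Int) : Int :=
  let s := (PySem.List.pyGet? lines i).getD ""                         -- lines[i]; none = IndexError
  let window := PySem.Str.slice s (some (max (j - 3) 0)) (some j)      -- lines[i][max(j-3,0):j]
  -- window.rstrip("0123456789"): PySem has no rstrip-with-chars primitive; exact hand port —
  -- drop from the right while c ∈ "0123456789", i.e. '0' ≤ c ≤ '9', which is PySem.Chars.isdigit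
  let stripped := (window.toList.reverse.dropWhile (fun c => PySem.Chars.isdigit c)).reverse
  let run := window.toList.drop stripped.length                        -- window[len(stripped):]
  if !run.isEmpty then (PySem.Int.ofChars? run).getD 0 else 0          -- int(run) if run else 0; run all-digit, never none

-- ===== PRECONDITION & SPEC =====
-- Pre_ excludes exactly the inputs where A raises IndexError: lines[i] out of range,
-- or the window lines[i][max(j-3,0):j] empty (then left[-1] raises).
def Pre_check_left (lines : List String) (i : Int) (j : Int) : Prop :=
  PySem.Raise.InRange lines.length i ∧
  ((1 ≤ j ∧ j - 3 < (((PySem.List.pyGetD lines i "").toList.length : Int)) ∧ 0 < (((PySem.List.pyGetD lines i "").toList.length : Int)))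
    ∨ (j < 0 ∧ 0 < (((PySem.List.pyGetD lines i "").toList.length : Int)) + j))
instance (lines : List String) (i : Int) (j : Int) : Decidable (Pre_check_left lines i j) := by unfold Pre_check_left; infer_instance

def pvWitness_check_left : List String × Int × Int := (["12a34"], 0, 5)

def Spec_check_left (lines : List String) (i : Int) (j : Int) (out : Int) : Prop := out = check_left_alt lines i j
instance (lines : List String) (i : Int) (j : Int) (out : Int) : Decidable (Spec_check_left lines i j out) := by unfold Spec_check_left; infer_instance

-- ===== CLAIM (what is proved, stated in full; the proofs are below) =====
def Claim_equal_check_left : Prop := ∀ (lines : List String) (i : Int) (j : Int), Dom_check_left lines i j → Pre_check_left lines i j → Spec_check_left lines i j (check_left lines i j)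

-- ===== LEMMAS AND PROOFS =====

-- A's loop prepends exactly the digits of the reversed tail, i.e. a reversed takeWhile
theorem checkLeftLoop_eq (xs acc : List Char) :
    checkLeftLoop xs acc = (xs.takeWhile PySem.Chars.isdigit).reverse ++ acc := by
  induction xs generalizing acc with
  | nil => simp [checkLeftLoop]
  | cons c rest ih =>
    by_cases h : PySem.Chars.isdigit c <;> simp [checkLeftLoop, h, ih]

-- B's run (drop the length of the right-stripped part) is the reversed takeWhile of the reverse
theorem run_eq (r : List Char) (p : Char → Bool) :
    r.reverse.drop ((r.dropWhile p).reverse).length = (r.takeWhile p).reverse := by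
  have hr : r.takeWhile p ++ r.dropWhile p = r := List.takeWhile_append_dropWhile
  nth_rewrite 2 [← hr]
  rw [List.reverse_append, List.drop_left]

-- the Pre_ arithmetic says exactly that the sliced window is nonempty
theorem window_ne (s : List Char) (j : Int)
    (h : (1 ≤ j ∧ j - 3 < (s.length : Int) ∧ 0 < (s.length : Int)) ∨ (j < 0 ∧ 0 < (s.length : Int) + j)) :
    PySem.List.slice s (some (max (j - 3) 0)) (some j) ≠ [] := by
  have h1 : (PySem.List.slice s (some (max (j - 3) 0)) (some j)).length ≠ 0 := by
    rw [PySem.List.length_slice]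
    simp only [PySem.List.clampIdx]
    split_ifs <;> omega
  exact fun hnil => h1 (by simp [hnil])

-- both ports agree on any nonempty window
theorem core_eq (w : List Char) (hw : w ≠ []) :
    (match PySem.List.pyGet? w (-1) with
     | none => (0 : Int)
     | some last =>
       if ¬ PySem.Chars.isdigit last then 0
       else (PySem.Int.ofChars? (checkLeftLoop (w.reverse.drop 1) [last])).getD 0)
    = (if !(w.drop (((w.reverse.dropWhile (fun c => PySem.Chars.isdigit c)).reverse).length)).isEmpty
       then (PySem.Int.ofChars? (w.drop (((w.reverse.dropWhile (fun c => PySem.Chars.isdigit c)).reverse).length))).getD 0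
       else 0) := by
  rcases (List.eq_nil_or_concat w) with rfl | ⟨ys, c, rfl⟩
  · exact absurd rfl hw
  · simp only [List.concat_eq_append]
    have hrun : (ys ++ [c]).drop ((((ys ++ [c]).reverse.dropWhile (fun c => PySem.Chars.isdigit c)).reverse).length)
        = ((ys ++ [c]).reverse.takeWhile (fun c => PySem.Chars.isdigit c)).reverse := by
      have := run_eq (ys ++ [c]).reverse (fun c => PySem.Chars.isdigit c)
      simpa using this
    rw [PySem.List.pyGet?_neg_one, List.getLast?_concat, hrun]
    have hrev : (ys ++ [c]).reverse = c :: ys.reverse := by simp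
    by_cases hd : PySem.Chars.isdigit c
    · simp only [hrev, List.takeWhile_cons, hd, if_true, List.drop_succ_cons, List.drop_zero,
        checkLeftLoop_eq, List.reverse_cons]
      simp
    · simp [hrev, hd]

-- ===== VERDICT =====
theorem check_left_spec : Claim_equal_check_left := by
  intro lines i j _ hpre
  obtain ⟨hin, harith⟩ := hpre
  cases hs : PySem.List.pyGet? lines i with
  | none =>
    rw [PySem.List.pyGet?_eq_none_iff] at hs
    exact absurd hin hs
  | some s =>
    have hgetD : PySem.List.pyGetD lines i "" = s := by
      simp [PySem.List.pyGetD, hs]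
    rw [hgetD] at harith
    have hne : PySem.List.slice s.toList (some (max (j - 3) 0)) (some j) ≠ [] :=
      window_ne s.toList j harith
    unfold Spec_check_left check_left check_left_alt
    simp only [hs, Option.getD_some, PySem.Str.slice, PySem.Str.pyGet?, String.toList_ofList,
      PySem.Chars.slice, PySem.Chars.pyGet?]
    exact core_eq _ hne
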